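-- pv_equiv track=rewrite | github.com/torkay/ccpool | cmaxctl/doctor.py | highest_severity
-- ===== SOURCE A (Python) =====
-- from typing import Any
--
-- SEVERITY_RANK = {"CRITICAL": 4, "HIGH": 3, "MEDIUM": 2, "LOW": 1}
--
-- def highest_severity(findings: list[dict[str, Any]]) -> str | None:
--     sev = max((SEVERITY_RANK.get(f.get("severity", ""), 0) for f in findings), default=0)
--     if sev == 0:
--         return None
--     for k, v in SEVERITY_RANK.items():
--         if v == sev:
--             return k
--     return None
-- ===== SOURCE B (Python) =====
-- LEVELS = ("CRITICAL", "HIGH", "MEDIUM", "LOW")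
--
-- def highest_severity(findings):
--     for level in LEVELS:
--         if any(f.get("severity", "") == level for f in findings):
--             return level
--     return None
-- ===== Notes on version B (the rewrite author's own statement) =====
-- stated objective: idiomatic
-- what changed: Replaces 'compute numeric max of ranks, then reverse-lookup the rank in SEVERITY_RANK' with a short-circuit scan of the severity names in fixed descending order, returning the first level present among the findings; no rank dict and no max().
import Mathlib
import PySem

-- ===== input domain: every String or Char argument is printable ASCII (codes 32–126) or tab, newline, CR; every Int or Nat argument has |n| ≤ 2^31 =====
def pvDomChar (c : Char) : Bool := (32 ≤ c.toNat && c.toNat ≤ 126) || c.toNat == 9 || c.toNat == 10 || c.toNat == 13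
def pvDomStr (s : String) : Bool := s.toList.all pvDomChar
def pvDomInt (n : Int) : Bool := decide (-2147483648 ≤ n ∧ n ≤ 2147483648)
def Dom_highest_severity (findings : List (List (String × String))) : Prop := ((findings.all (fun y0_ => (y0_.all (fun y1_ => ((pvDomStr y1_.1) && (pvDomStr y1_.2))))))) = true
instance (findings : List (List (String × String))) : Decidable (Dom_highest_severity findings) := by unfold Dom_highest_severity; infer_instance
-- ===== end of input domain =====

-- B replaces 'numeric max of ranks + reverse lookup' by a short-circuit scan of the
-- severity names in descending order, returning the first level present (idiomatic).


-- ===== PORT A =====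
def sevRank : PySem.Dict String Int :=
  PySem.Dict.mk [("CRITICAL", 4), ("HIGH", 3), ("MEDIUM", 2), ("LOW", 1)]

def highest_severity (findings : List (List (String × String))) : Option String :=
  let sev := (findings.map (fun f =>
    sevRank.getD ((PySem.Dict.mk f).getD "severity" "") 0)).foldl max 0
  if sev == 0 then none
  else ((sevRank.items.find? (fun kv => kv.2 == sev)).map (·.1))

-- ===== PORT B =====
def highest_severity_alt (findings : List (List (String × String))) : Option String :=
  ["CRITICAL", "HIGH", "MEDIUM", "LOW"].find? (fun lvl =>
    findings.any (fun f => (PySem.Dict.mk f).getD "severity" "" == lvl))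

-- ===== PRECONDITION & SPEC =====
def Spec_highest_severity (findings : List (List (String × String))) (out : Option String) : Prop := out = highest_severity_alt findings
instance (findings : List (List (String × String))) (out : Option String) : Decidable (Spec_highest_severity findings out) := by unfold Spec_highest_severity; infer_instance

-- ===== CLAIM (what is proved, stated in full; the proofs are below) =====
def Claim_equal_highest_severity : Prop := ∀ (findings : List (List (String × String))), Dom_highest_severity findings → Spec_highest_severity findings (highest_severity findings)

-- ===== LEMMAS AND PROOFS =====

def pvSev (f : List (String × String)) : String := (PySem.Dict.mk f).getD "severity" ""
def pvRank (f : List (String × String)) : Int := sevRank.getD (pvSev f) 0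

lemma rank_char (s : String) :
    sevRank.getD s 0 =
      if s = "CRITICAL" then 4 else if s = "HIGH" then 3
      else if s = "MEDIUM" then 2 else if s = "LOW" then 1 else 0 := by
  simp only [sevRank, PySem.Dict.getD_eq_get?_getD, PySem.Dict.get?_mk_cons, beq_iff_eq]
  split_ifs <;> first | rfl | (subst_vars; simp_all)

lemma foldl_max_spec (l : List Int) (a : Int) :
    a ≤ l.foldl max a ∧ (∀ x ∈ l, x ≤ l.foldl max a) ∧
      (l.foldl max a = a ∨ l.foldl max a ∈ l) := by
  induction l generalizing a with
  | nil => simp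
  | cons y ys ih =>
    simp only [List.foldl_cons]
    obtain ⟨h1, h2, h3⟩ := ih (max a y)
    refine ⟨le_trans (le_max_left a y) h1, ?_, ?_⟩
    · intro x hx
      rcases List.mem_cons.mp hx with hx0 | hx
      · rw [hx0]; exact le_trans (le_max_right a y) h1
      · exact h2 _ hx
    · rcases h3 with h | h
      · rcases max_choice a y with hm | hm
        · left; rw [hm] at h ⊢; exact h
        · right; rw [hm] at h ⊢; rw [h]; simp
      · right; exact List.mem_cons_of_mem _ h

lemma rank_cases (f : List (String × String)) :
    pvRank f = 0 ∨ pvRank f = 1 ∨ pvRank f = 2 ∨ pvRank f = 3 ∨ pvRank f = 4 := by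
  unfold pvRank; rw [rank_char]; split_ifs <;> simp

lemma rank_eq_iff (f : List (String × String)) :
    (pvRank f = 4 ↔ pvSev f = "CRITICAL") ∧
    (pvRank f = 3 ↔ pvSev f = "HIGH") ∧
    (pvRank f = 2 ↔ pvSev f = "MEDIUM") ∧
    (pvRank f = 1 ↔ pvSev f = "LOW") := by
  unfold pvRank; rw [rank_char]; split_ifs <;> simp_all

theorem highest_severity_spec : Claim_equal_highest_severity := by
  intro findings _
  unfold Spec_highest_severity highest_severity highest_severity_alt
  set m := (findings.map (fun f => sevRank.getD ((PySem.Dict.mk f).getD "severity" "") 0)).foldl max 0 with hm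
  have hmap : (findings.map (fun f => sevRank.getD ((PySem.Dict.mk f).getD "severity" "") 0)) = findings.map pvRank := by
    simp [pvRank, pvSev]
  rw [hmap] at hm
  obtain ⟨h0, hub, hmem⟩ := foldl_max_spec (findings.map pvRank) 0
  rw [← hm] at h0 hub hmem
  have hub' : ∀ f ∈ findings, pvRank f ≤ m := by
    intro f hf; exact hub _ (List.mem_map_of_mem hf)
  have hmcases : m = 0 ∨ m = 1 ∨ m = 2 ∨ m = 3 ∨ m = 4 := by
    rcases hmem with h | h
    · left; exact h
    · obtain ⟨f, _, hf⟩ := List.mem_map.mp h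
      rw [← hf]; exact rank_cases f
  -- any-level predicates
  have hany : ∀ (lvl : String),
      (findings.any (fun f => (PySem.Dict.mk f).getD "severity" "" == lvl)) = true ↔
      ∃ f ∈ findings, pvSev f = lvl := by
    intro lvl; simp [List.any_eq_true, pvSev]
  have hno : ∀ (r : Int) (lvl : String),
      (∀ f, pvRank f = r ↔ pvSev f = lvl) → m < r →
      (findings.any (fun f => (PySem.Dict.mk f).getD "severity" "" == lvl)) = false := by
    intro r lvl hiff hlt
    rw [← Bool.not_eq_true, hany]
    rintro ⟨f, hf, hsev⟩
    have := (hiff f).mpr hsev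
    have := hub' f hf
    omega
  have hyes : ∀ (r : Int) (lvl : String),
      (∀ f, pvRank f = r ↔ pvSev f = lvl) → 0 < r → m = r →
      (findings.any (fun f => (PySem.Dict.mk f).getD "severity" "" == lvl)) = true := by
    intro r lvl hiff hr hmr
    rcases hmem with h | h
    · omega
    · obtain ⟨f, hf, hfr⟩ := List.mem_map.mp h
      exact (hany lvl).mpr ⟨f, hf, (hiff f).mp (by omega)⟩
  have i4 := fun f => (rank_eq_iff f).1
  have i3 := fun f => (rank_eq_iff f).2.1
  have i2 := fun f => (rank_eq_iff f).2.2.1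
  have i1 := fun f => (rank_eq_iff f).2.2.2
  rcases hmcases with h | h | h | h | h
  · have b4 := hno 4 _ i4 (by omega); have b3 := hno 3 _ i3 (by omega)
    have b2 := hno 2 _ i2 (by omega); have b1 := hno 1 _ i1 (by omega)
    simp [h, b4, b3, b2, b1]
  · have b4 := hno 4 _ i4 (by omega); have b3 := hno 3 _ i3 (by omega)
    have b2 := hno 2 _ i2 (by omega); have b1 := hyes 1 _ i1 (by omega) h
    simp [h, b4, b3, b2, b1, sevRank]
  · have b4 := hno 4 _ i4 (by omega); have b3 := hno 3 _ i3 (by omega)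
    have b2 := hyes 2 _ i2 (by omega) h
    simp [h, b4, b3, b2, sevRank]
  · have b4 := hno 4 _ i4 (by omega); have b3 := hyes 3 _ i3 (by omega) h
    simp [h, b4, b3, sevRank]
  · have b4 := hyes 4 _ i4 (by omega) h
    simp [h, b4, sevRank]
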